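-- pv_equiv track=rewrite | github.com/J-sandler/SpecDiff-2 | tree_ar_infill.py | _build_tree_structure
-- ===== SOURCE A (Python) =====
-- from typing import Dict, List, Optional, Sequence, Tuple
--
-- def _build_tree_structure(branching: int, gamma: int) -> Tuple[List[int], List[int]]:
--     if branching <= 0 or gamma <= 0:
--         return [], []
--     parents: List[int] = []
--     depths: List[int] = []
--     prev_start = 0
--     prev_count = 1  # root (not stored in parents list)
--     total_nodes = 0
--     for depth in range(1, gamma + 1):
--         num_parents = prev_count
--         for p in range(num_parents):
--             for _ in range(branching):
--                 if depth == 1: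
--                     parents.append(-1)
--                 else:
--                     parents.append(prev_start + p)
--                 depths.append(depth)
--         total_nodes += num_parents * branching
--         prev_start = total_nodes - (num_parents * branching)
--         prev_count = num_parents * branching
--     return parents, depths
-- ===== SOURCE B (Python) =====
-- def _build_tree_structure(branching, gamma):
--     if branching <= 0 or gamma <= 0:
--         return [], []
--     parents = [-1] * branching
--     depths = [1] * branching
--     queue = []
--     if 1 < gamma:
--         queue.extend((i, 1) for i in range(branching))
--     while queue:
--         p, d = queue.pop(0)
--         base = len(parents)
--         parents.extend([p] * branching)
--         depths.extend([d + 1] * branching)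
--         if d + 1 < gamma:
--             queue.extend((base + i, d + 1) for i in range(branching))
--     return parents, depths
-- ===== Notes on version B (the rewrite author's own statement) =====
-- stated objective: alternative
-- what changed: Replaces A's level-by-level loop with prev_start/prev_count/total_nodes boundary arithmetic by an explicit FIFO queue of (node_index, depth) pairs: each popped node emits its `branching` children at consecutive indices and enqueues them while their depth is below gamma.
import Mathlib
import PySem

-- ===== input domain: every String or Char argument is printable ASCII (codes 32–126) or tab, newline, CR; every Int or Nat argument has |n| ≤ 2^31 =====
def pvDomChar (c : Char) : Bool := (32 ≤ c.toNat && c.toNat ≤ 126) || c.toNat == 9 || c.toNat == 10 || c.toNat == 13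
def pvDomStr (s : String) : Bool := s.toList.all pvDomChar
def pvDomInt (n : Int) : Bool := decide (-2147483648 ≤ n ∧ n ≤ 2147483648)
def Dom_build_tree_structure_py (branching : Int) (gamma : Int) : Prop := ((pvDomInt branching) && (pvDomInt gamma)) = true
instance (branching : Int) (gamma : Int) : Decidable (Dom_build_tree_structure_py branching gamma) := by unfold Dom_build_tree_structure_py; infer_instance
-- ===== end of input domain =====

-- B replaces A's level-boundary counter arithmetic by an explicit FIFO queue of (node_index, depth)
-- pairs, generating children node by node; same return value (objective: alternative).

-- ===== PORT A =====
-- A's loop body for one `depth` (state: parents, depths, prev_start, prev_count, total_nodes)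
def Astep (branching : Int) (s : List Int × List Int × Int × Int × Int) (depth : Int) :
    List Int × List Int × Int × Int × Int :=
  let num_parents := s.2.2.2.1
  let pd := (PySem.List.pyRange 0 num_parents 1).foldl
    (fun (pd : List Int × List Int) p =>
      (PySem.List.pyRange 0 branching 1).foldl
        (fun (pd2 : List Int × List Int) _ =>
          ((if depth = 1 then pd2.1 ++ [(-1 : Int)] else pd2.1 ++ [s.2.2.1 + p]),
           pd2.2 ++ [depth]))
        pd)
    (s.1, s.2.1)
  let total_nodes := s.2.2.2.2 + num_parents * branching
  (pd.1, pd.2, total_nodes - num_parents * branching, num_parents * branching, total_nodes)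

def build_tree_structure_py (branching : Int) (gamma : Int) : List Int × List Int :=
  if branching ≤ 0 ∨ gamma ≤ 0 then ([], [])
  else
    let st := (PySem.List.pyRange 1 (gamma + 1) 1).foldl (Astep branching) ([], [], 0, 1, 0)
    (st.1, st.2.1)

-- ===== PORT B =====
-- termination measure for the BFS queue: a pending (index, depth) entry weighs (branching+1)^(gamma-depth)
def btsMeasure (branching gamma : Int) (q : List (Int × Int)) : Nat :=
  (q.map (fun e => (branching.toNat + 1) ^ (gamma - e.2).toNat)).sum

-- popping one entry strictly decreases the measure (cited by btsAltLoop's decreasing_by)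
theorem btsMeasure_dec (branching gamma p d : Int) (f : Int → Int) (rest : List (Int × Int)) :
    btsMeasure branching gamma
      (if d + 1 < gamma then
        rest ++ (PySem.List.pyRange 0 branching 1).map (fun i => (f i, d + 1))
       else rest)
    < btsMeasure branching gamma ((p, d) :: rest) := by
  have hpos : 0 < (branching.toNat + 1) ^ (gamma - d).toNat := pow_pos (by omega) _
  simp only [btsMeasure, List.map_cons, List.sum_cons]
  split_ifs with h
  · simp only [List.map_append, List.sum_append, List.map_map, PySem.List.pyRange_one,
      Function.comp_def, List.map_const', List.length_range, List.sum_replicate, smul_eq_mul]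
    have hk : (gamma - d).toNat = (gamma - (d + 1)).toNat + 1 := by omega
    have : (branching - 0).toNat * (branching.toNat + 1) ^ (gamma - (d + 1)).toNat
        < (branching.toNat + 1) ^ (gamma - d).toNat := by
      rw [hk, pow_succ, Nat.mul_comm _ (branching.toNat + 1)]
      have h2 : (branching - 0).toNat < branching.toNat + 1 := by omega
      exact Nat.mul_lt_mul_of_lt_of_le h2 (Nat.le_refl _) (pow_pos (by omega) _)
    omega
  · omega

-- B's `while queue:` loop; `pop(0)` is the head of the list
def btsAltLoop (branching gamma : Int) (parents depths : List Int) (queue : List (Int × Int)) :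
    List Int × List Int :=
  match queue with
  | [] => (parents, depths)
  | (p, d) :: rest =>
    let base : Int := parents.length
    btsAltLoop branching gamma
      (parents ++ List.replicate branching.toNat p)
      (depths ++ List.replicate branching.toNat (d + 1))
      (if d + 1 < gamma then
        rest ++ (PySem.List.pyRange 0 branching 1).map (fun i => (base + i, d + 1))
       else rest)
termination_by btsMeasure branching gamma queue
decreasing_by
  exact btsMeasure_dec branching gamma p d (fun i => (parents.length : Int) + i) rest

def build_tree_structure_py_alt (branching : Int) (gamma : Int) : List Int × List Int :=
  if branching ≤ 0 ∨ gamma ≤ 0 then ([], [])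
  else
    let parents := List.replicate branching.toNat (-1 : Int)
    let depths := List.replicate branching.toNat (1 : Int)
    let queue := if 1 < gamma then (PySem.List.pyRange 0 branching 1).map (fun i => (i, (1 : Int)))
                 else []
    btsAltLoop branching gamma parents depths queue

-- ===== PRECONDITION & SPEC =====
def Spec_build_tree_structure_py (branching : Int) (gamma : Int) (out : List Int × List Int) : Prop := out = build_tree_structure_py_alt branching gamma
instance (branching : Int) (gamma : Int) (out : List Int × List Int) : Decidable (Spec_build_tree_structure_py branching gamma out) := by unfold Spec_build_tree_structure_py; infer_instance

-- ===== CLAIM (what is proved, stated in full; the proofs are below) =====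
def Claim_equal_build_tree_structure_py : Prop := ∀ (branching : Int) (gamma : Int), Dom_build_tree_structure_py branching gamma → Spec_build_tree_structure_py branching gamma (build_tree_structure_py branching gamma)

-- ===== LEMMAS AND PROOFS =====
def consec : Int → Nat → Int → List (Int × Int)
  | _, 0, _ => []
  | s, c+1, d => (s, d) :: consec (s+1) c d

def childParents (b : Int) : Int → Nat → List Int
  | _, 0 => []
  | s, c+1 => List.replicate b.toNat s ++ childParents b (s+1) c

theorem consec_append (d : Int) (c e : Nat) : ∀ s : Int,
    consec s (c + e) d = consec s c d ++ consec (s + (c : Int)) e d := by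
  induction c with
  | zero => intro s; simp [consec]
  | succ c ih =>
    intro s
    have : c + 1 + e = (c + e) + 1 := by omega
    rw [this]
    simp only [consec, ih (s+1), List.cons_append]
    congr 3
    push_cast; ring

theorem childParents_length (b : Int) (c : Nat) : ∀ s : Int,
    (childParents b s c).length = c * b.toNat := by
  induction c with
  | zero => intro s; simp [childParents]
  | succ c ih => intro s; simp [childParents, ih]; ring

theorem map_range_consec (d : Int) (c : Nat) : ∀ t : Int,
    (List.range c).map (fun (k : Nat) => ((t + (k : Int), d) : Int × Int)) = consec t c d := by
  induction c with
  | zero => intro t; simp [consec]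
  | succ c ih =>
    intro t
    rw [List.range_succ_eq_map]
    simp only [List.map_cons, List.map_map, consec]
    rw [← ih (t+1)]
    congr 1
    · simp
    · apply List.map_congr_left
      intro k _
      simp [Function.comp, Nat.succ_eq_add_one]
      ring

theorem map_pyRange_consec (b t d : Int) :
    (PySem.List.pyRange 0 b 1).map (fun i => (t + i, d)) = consec t b.toNat d := by
  rw [PySem.List.pyRange_one]
  simp only [List.map_map, Int.sub_zero]
  rw [← map_range_consec d b.toNat t]
  apply List.map_congr_left
  intro k _
  simp

theorem loop_noenq (branching gamma dp : Int) (hg : ¬ dp + 1 < gamma) (c : Nat) :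
    ∀ (P D : List Int) (s : Int),
    btsAltLoop branching gamma P D (consec s c dp)
      = (P ++ childParents branching s c, D ++ List.replicate (c * branching.toNat) (dp + 1)) := by
  induction c with
  | zero => intro P D s; simp [consec, btsAltLoop, childParents]
  | succ c ih =>
    intro P D s
    rw [consec, btsAltLoop]
    simp only [if_neg hg]
    rw [ih]
    have h1 : (c + 1) * branching.toNat = branching.toNat + c * branching.toNat := by ring
    rw [h1, List.replicate_add]
    simp [childParents, List.append_assoc]

theorem loop_enq (branching gamma dp : Int) (hg : dp + 1 < gamma) (c : Nat) :
    ∀ (P D : List Int) (s t : Int) (e : Nat), t + (e : Int) = (P.length : Int) →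
    btsAltLoop branching gamma P D (consec s c dp ++ consec t e (dp + 1))
      = btsAltLoop branching gamma (P ++ childParents branching s c)
          (D ++ List.replicate (c * branching.toNat) (dp + 1))
          (consec t (e + c * branching.toNat) (dp + 1)) := by
  induction c with
  | zero => intro P D s t e ht; simp [consec, childParents]
  | succ c ih =>
    intro P D s t e ht
    rw [consec, List.cons_append, btsAltLoop]
    simp only [if_pos hg]
    rw [List.append_assoc, map_pyRange_consec branching (P.length : Int) (dp + 1)]
    have hte : consec t e (dp + 1) ++ consec (P.length : Int) branching.toNat (dp + 1)
        = consec t (e + branching.toNat) (dp + 1) := by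
      rw [consec_append (dp + 1) e branching.toNat t, ht]
    rw [hte, ih]
    · have h1 : (c + 1) * branching.toNat = branching.toNat + c * branching.toNat := by ring
      have h2 : e + (c + 1) * branching.toNat = (e + branching.toNat) + c * branching.toNat := by ring
      rw [h1, List.replicate_add]
      simp [childParents, List.append_assoc, Nat.add_assoc]
    · simp; omega

theorem childParents_snoc (b : Int) (c : Nat) : ∀ s : Int,
    childParents b s (c + 1) = childParents b s c ++ List.replicate b.toNat (s + (c : Int)) := by
  induction c with
  | zero => intro s; simp [childParents]
  | succ c ih =>
    intro s
    show List.replicate b.toNat s ++ childParents b (s+1) (c+1) = _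
    rw [ih (s+1)]
    simp only [childParents, List.append_assoc]
    congr 3
    push_cast; ring

theorem foldl_const_append {α : Type} (v depth : Int) (l : List α) : ∀ P D : List Int,
    l.foldl (fun (pd2 : List Int × List Int) _ => (pd2.1 ++ [v], pd2.2 ++ [depth])) (P, D)
      = (P ++ List.replicate l.length v, D ++ List.replicate l.length depth) := by
  induction l with
  | nil => intro P D; simp
  | cons x xs ih =>
    intro P D
    rw [List.foldl_cons, ih]
    have hv : ∀ (a : Int) (n : Nat), [a] ++ List.replicate n a = List.replicate (n + 1) a := by
      intro a n; simp [List.replicate_succ]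
    rw [List.append_assoc, List.append_assoc, hv, hv]
    simp

theorem A_inner (branching depth ps : Int) (c : Nat) :
    ∀ P D : List Int, (PySem.List.pyRange 0 (c : Int) 1).foldl
      (fun (pd : List Int × List Int) p => (PySem.List.pyRange 0 branching 1).foldl
        (fun (pd2 : List Int × List Int) _ => (pd2.1 ++ [ps + p], pd2.2 ++ [depth])) pd) (P, D)
    = (P ++ childParents branching ps c, D ++ List.replicate (c * branching.toNat) depth) := by
  induction c with
  | zero => intro P D; simp [childParents]
  | succ c ih =>
    intro P D
    have hsplit : PySem.List.pyRange 0 ((c : Int) + 1) 1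
        = PySem.List.pyRange 0 (c : Int) 1 ++ [(c : Int)] := by
      rw [PySem.List.pyRange_one_succ_right (by omega)]
    push_cast
    rw [hsplit, List.foldl_append, ih]
    simp only [List.foldl_cons, List.foldl_nil]
    rw [foldl_const_append, childParents_snoc]
    have hlen : (PySem.List.pyRange 0 branching 1).length = branching.toNat := by
      rw [PySem.List.length_pyRange_one]; congr 1; omega
    have hrep : (c + 1) * branching.toNat = c * branching.toNat + branching.toNat := by ring
    rw [hlen, hrep, List.replicate_add]
    simp [List.append_assoc]

theorem Astep_eq (branching : Int) (hb : 0 < branching) (d : Int) (hd : 2 ≤ d)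
    (P D : List Int) (s : Int) (c : Nat) :
    Astep branching (P, D, s, (c : Int), (P.length : Int)) d
      = (P ++ childParents branching s c, D ++ List.replicate (c * branching.toNat) d,
         (P.length : Int), ((c * branching.toNat : Nat) : Int),
         ((P.length + c * branching.toNat : Nat) : Int)) := by
  have hd1 : ¬ d = 1 := by omega
  unfold Astep
  simp only [if_neg hd1]
  rw [A_inner branching d s c P D]
  have hcb : (c : Int) * branching = ((c * branching.toNat : Nat) : Int) := by
    push_cast
    rw [Int.toNat_of_nonneg (by omega)]
  simp only [Prod.mk.injEq]
  exact ⟨trivial, trivial, by ring, hcb, by rw [hcb]; push_cast; ring⟩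

theorem A_outer (branching gamma : Int) (hb : 0 < branching) :
    ∀ (k : Nat) (d : Int), (gamma + 1 - d).toNat = k → 2 ≤ d → d ≤ gamma →
    ∀ (P D : List Int) (s : Int) (c : Nat), 0 < c →
    (let st := (PySem.List.pyRange d (gamma + 1) 1).foldl (Astep branching)
        (P, D, s, (c : Int), (P.length : Int));
      (st.1, st.2.1))
      = btsAltLoop branching gamma P D (consec s c (d - 1)) := by
  intro k
  induction k using Nat.strong_induction_on with
  | _ k ih =>
    intro d hk hd2 hdg P D s c hc
    have hcons : PySem.List.pyRange d (gamma + 1) 1 = d :: PySem.List.pyRange (d + 1) (gamma + 1) 1 :=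
      PySem.List.pyRange_one_cons (by omega)
    simp only [hcons, List.foldl_cons]
    rw [Astep_eq branching hb d hd2 P D s c]
    by_cases hlt : d < gamma
    · -- more levels to come: children are enqueued
      have hq : btsAltLoop branching gamma P D (consec s c (d - 1))
          = btsAltLoop branching gamma (P ++ childParents branching s c)
              (D ++ List.replicate (c * branching.toNat) ((d - 1) + 1))
              (consec (P.length : Int) (0 + c * branching.toNat) ((d - 1) + 1)) := by
        have := loop_enq branching gamma (d - 1) (by omega) c P D s (P.length : Int) 0 (by simp)
        simpa [consec] using this
      have hone : (d : Int) - 1 + 1 = d := by ring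
      rw [hq, hone]
      have := ih (gamma + 1 - (d + 1)).toNat (by omega) (d + 1) rfl (by omega) (by omega)
        (P ++ childParents branching s c) (D ++ List.replicate (c * branching.toNat) d)
        (P.length : Int) (c * branching.toNat)
        (Nat.mul_pos hc (by omega))
      simp only [List.length_append, childParents_length, add_sub_cancel_right] at this
      simp only [Nat.zero_add]
      exact this
    · -- d = gamma: last level, nothing is enqueued
      have hdg' : d = gamma := by omega
      have hnil : PySem.List.pyRange (d + 1) (gamma + 1) 1 = [] := by
        subst hdg'; simp
      rw [hnil]
      simp only [List.foldl_nil]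
      have := loop_noenq branching gamma (d - 1) (by omega) c P D s
      rw [this]
      simp [hdg']

theorem Astep_one (branching : Int) :
    Astep branching ([], [], 0, 1, 0) 1
      = (List.replicate branching.toNat (-1), List.replicate branching.toNat 1,
         0, branching, branching) := by
  unfold Astep
  have h01 : PySem.List.pyRange 0 1 1 = [0] := by decide
  simp only [h01, List.foldl_cons, List.foldl_nil, if_pos trivial]
  rw [foldl_const_append]
  have hlen : (PySem.List.pyRange 0 branching 1).length = branching.toNat := by
    rw [PySem.List.length_pyRange_one]; congr 1; omega
  simp [hlen]

theorem main_eq (branching gamma : Int) :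
    build_tree_structure_py branching gamma = build_tree_structure_py_alt branching gamma := by
  unfold build_tree_structure_py build_tree_structure_py_alt
  by_cases hguard : branching ≤ 0 ∨ gamma ≤ 0
  · simp [hguard]
  · simp only [if_neg hguard]
    push Not at hguard
    obtain ⟨hb', hg'⟩ := hguard
    have hb : 0 < branching := by omega
    have hg : 0 < gamma := by omega
    have hBint : ((branching.toNat : Nat) : Int) = branching := Int.toNat_of_nonneg (by omega)
    have hcons : PySem.List.pyRange 1 (gamma + 1) 1 = 1 :: PySem.List.pyRange 2 (gamma + 1) 1 :=
      PySem.List.pyRange_one_cons (by omega)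
    simp only [hcons, List.foldl_cons, Astep_one]
    by_cases hg1 : gamma = 1
    · subst hg1
      have hnil : PySem.List.pyRange 2 2 1 = [] := by decide
      simp [hnil, btsAltLoop]
    · have hg2 : 2 ≤ gamma := by omega
      have hqueue : (if 1 < gamma then
            (PySem.List.pyRange 0 branching 1).map (fun i => (i, (1 : Int))) else [])
          = consec 0 branching.toNat 1 := by
        rw [if_pos (by omega)]
        rw [← map_pyRange_consec branching 0 1]
        apply List.map_congr_left
        intro i _; simp
      rw [hqueue]
      have := A_outer branching gamma hb (gamma + 1 - 2).toNat 2 rfl (by omega) (by omega)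
        (List.replicate branching.toNat (-1)) (List.replicate branching.toNat 1)
        0 branching.toNat (by omega)
      simp only [List.length_replicate, hBint] at this
      simpa using this

-- ===== VERDICT (by name: the statement is the Claim_ definition above) =====
theorem build_tree_structure_py_spec : Claim_equal_build_tree_structure_py := by
  intro branching gamma _
  unfold Spec_build_tree_structure_py
  exact main_eq branching gamma
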